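-- pv_equiv track=rewrite | github.com/pypi-data/pypi-code-11 | sqt/sqt-0.6.1.tar.gz/sqt/dna.py | n_intervals
-- ===== SOURCE A (Python) =====
-- def n_intervals(sequence, N='N'):
-- 	"""
-- 	Given a sequence, yield all intervals containing only N characters as
-- 	tuples (start, stop). If the sequence is a bytes/bytearray object,
-- 	set N=ord(b'N')
--
-- 	>>> list(n_intervals('ACGTnNAC'))
-- 	[(4, 6)]
-- 	>>> list(n_intervals(b'ACGTnNAC', N=ord(b'N')))
-- 	[(4, 6)]
-- 	"""
-- 	sequence = sequence.upper()
-- 	start = sequence.find(N)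
-- 	while start >= 0:
-- 		stop = start + 1
-- 		while stop < len(sequence) and sequence[stop] == N:
-- 			stop += 1
-- 		yield (start, stop)
-- 		start = sequence.find(N, stop)
-- ===== SOURCE B (Python) =====
-- def n_intervals(sequence, N='N'):
-- 	"""Yield (start, stop) intervals of consecutive N characters.
--
-- 	Single flat state-machine pass instead of find-plus-inner-scan loops.
-- 	"""
-- 	sequence = sequence.upper()
-- 	run_start = None
-- 	for i, c in enumerate(sequence):
-- 		if c == N:
-- 			if run_start is None:
-- 				run_start = i
-- 		elif run_start is not None:
-- 			yield (run_start, i)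
-- 			run_start = None
-- 	if run_start is not None:
-- 		yield (run_start, len(sequence))
-- ===== Notes on version B (the rewrite author's own statement) =====
-- stated objective: idiomatic
-- what changed: Replaces A's outer find()-jump loop with an inner while-scan per run by a single flat enumerate pass maintaining a run_start state variable that opens a run on the first N and closes it on the first non-N (flushing a trailing run after the loop).
-- intended difference: When N is not a single character and is empty or occurs as a substring of the uppercased sequence (e.g. ('NN','NN')), A returns one-character-wide pseudo-intervals at each substring occurrence because its run-extension compares a character with the whole string N, while B returns [] (no single character equals N), which is the intended behaviour for a function documented over one N character. — e.g. on n_intervals("NN", "NN"): A returns [(0, 1)], B returns []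
import Mathlib
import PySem

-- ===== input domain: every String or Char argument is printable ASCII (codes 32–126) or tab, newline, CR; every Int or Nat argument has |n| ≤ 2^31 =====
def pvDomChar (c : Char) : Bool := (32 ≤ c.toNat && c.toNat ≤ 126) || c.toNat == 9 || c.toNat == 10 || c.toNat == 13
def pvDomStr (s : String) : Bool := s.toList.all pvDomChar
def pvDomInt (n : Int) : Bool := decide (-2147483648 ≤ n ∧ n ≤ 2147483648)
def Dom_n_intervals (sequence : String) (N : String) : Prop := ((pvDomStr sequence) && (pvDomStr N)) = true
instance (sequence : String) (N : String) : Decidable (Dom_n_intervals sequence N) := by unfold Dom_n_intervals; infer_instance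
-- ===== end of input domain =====

-- B replaces A's find-plus-inner-scan nested loops by a single enumerate pass with a
-- run_start state variable (idiomatic, same O(n) cost); on the accidental inputs where
-- len(N) ≠ 1, A reports substring occurrences while B reports the (empty) set of
-- single-character runs — stated as the intended difference D_ below.

-- ===== PORT A =====
-- inner `while stop < len(sequence) and sequence[stop] == N: stop += 1`
-- (fuel `cs.length` only makes the recursion total: stop grows once per step and the
-- condition needs stop < cs.length, so fuel ≥ cs.length - stop never runs out)
def aScan (cs : List Char) (N : List Char) : Nat → Nat → Nat
  | 0, stop => stop
  | f + 1, stop =>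
    if stop < cs.length ∧ [cs.getD stop ' '] = N then aScan cs N f (stop + 1) else stop

-- outer `while start >= 0` loop; fuel cs.length + 2 suffices (start strictly increases)
def aLoop (cs : List Char) (N : List Char) : Nat → Int → List (Int × Int)
  | 0, _ => []
  | f + 1, start =>
    if 0 ≤ start then
      let stop := aScan cs N cs.length (start.toNat + 1)
      (start, (stop : Int)) :: aLoop cs N f (PySem.Chars.findFrom cs N (stop : Int))
    else []

def n_intervals (sequence : String) (N : String) : List (Int × Int) :=
  let cs := PySem.Chars.upper sequence.toList
  aLoop cs N.toList (cs.length + 2) (PySem.Chars.find cs N.toList)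

-- ===== PORT B =====
-- `for i, c in enumerate(sequence)` with run_start state; `c == N` is the 1-char
-- string [c] compared with N, as in Python
def bLoop (N : List Char) (slen : Int) : List (Int × Char) → Option Int → List (Int × Int)
  | [], none => []
  | [], some s => [(s, slen)]
  | (i, c) :: rest, st =>
    if [c] = N then
      bLoop N slen rest (match st with | none => some i | some s => some s)
    else
      match st with
      | some s => (s, i) :: bLoop N slen rest none
      | none => bLoop N slen rest none

def n_intervals_alt (sequence : String) (N : String) : List (Int × Int) :=
  let cs := PySem.Chars.upper sequence.toList
  bLoop N.toList (cs.length : Int) (PySem.List.enumerate cs) none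

-- ===== PRECONDITION & SPEC =====
-- Inputs where N is not a single character and N is empty or occurs as a substring of
-- the uppercased sequence: A returns one-character-wide pseudo-intervals at each
-- substring occurrence (its run-extension compares a CHARACTER with the whole string N,
-- which can never be equal), B returns the empty list of single-character N-runs,
-- which is the intended behaviour for a function documented over a single N character.
def D_n_intervals (sequence : String) (N : String) : Prop :=
  N.toList.length ≠ 1 ∧
    (N.toList = [] ∨ PySem.Chars.isIn N.toList (PySem.Chars.upper sequence.toList) = true)
instance (sequence : String) (N : String) : Decidable (D_n_intervals sequence N) := by
  unfold D_n_intervals; infer_instance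

def Spec_n_intervals (sequence : String) (N : String) (out : List (Int × Int)) : Prop :=
  ¬ D_n_intervals sequence N → out = n_intervals_alt sequence N
instance (sequence : String) (N : String) (out : List (Int × Int)) :
    Decidable (Spec_n_intervals sequence N out) := by unfold Spec_n_intervals; infer_instance

def pvDiffWitness_n_intervals : String × String := ("NN", "NN")
def pvDiffWitnessOut_n_intervals : (List (Int × Int)) × (List (Int × Int)) :=
  ([(0, 1)], [])

-- ===== CLAIM =====
def Claim_unchanged_n_intervals : Prop :=
  ∀ (sequence : String) (N : String), Dom_n_intervals sequence N →
    Spec_n_intervals sequence N (n_intervals sequence N)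

def Claim_changed_n_intervals : Prop :=
  Dom_n_intervals (pvDiffWitness_n_intervals.1) (pvDiffWitness_n_intervals.2) ∧
  D_n_intervals (pvDiffWitness_n_intervals.1) (pvDiffWitness_n_intervals.2) ∧
  n_intervals (pvDiffWitness_n_intervals.1) (pvDiffWitness_n_intervals.2) = pvDiffWitnessOut_n_intervals.1 ∧
  n_intervals_alt (pvDiffWitness_n_intervals.1) (pvDiffWitness_n_intervals.2) = pvDiffWitnessOut_n_intervals.2 ∧
  pvDiffWitnessOut_n_intervals.1 ≠ pvDiffWitnessOut_n_intervals.2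

def Claim_exact_n_intervals : Prop :=
  ∀ (sequence : String) (N : String), Dom_n_intervals sequence N →
    D_n_intervals sequence N → n_intervals sequence N ≠ n_intervals_alt sequence N

-- ===== LEMMAS AND PROOFS =====

-- the canonical list of maximal runs of ch, as a structural recursion; both ports are
-- proved equal to it when N = [ch]
mutual
def runsR (ch : Char) : List Char → Nat → List (Int × Int)
  | [], _ => []
  | c :: t, i => if c = ch then extR ch t i (i + 1) else runsR ch t (i + 1)
def extR (ch : Char) : List Char → Nat → Nat → List (Int × Int)
  | [], s, j => [((s : Int), (j : Int))]
  | c :: t, s, j =>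
    if c = ch then extR ch t s (j + 1) else ((s : Int), (j : Int)) :: runsR ch t (j + 1)
end

lemma runsR_nil (ch : Char) (t : List Char) (i : Nat) (h : ch ∉ t) : runsR ch t i = [] := by
  induction t generalizing i with
  | nil => rfl
  | cons c t ih =>
    simp only [List.mem_cons, not_or] at h
    simp only [runsR]
    rw [if_neg (fun hc => h.1 hc.symm)]
    exact ih (i + 1) h.2

lemma bLoop_of_no_match (N : List Char) (slen : Int) (items : List (Int × Char))
    (h : ∀ c : Char, [c] ≠ N) : bLoop N slen items none = [] := by
  induction items with
  | nil => rfl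
  | cons p rest ih => obtain ⟨i, c⟩ := p; simp [bLoop, h c, ih]

lemma bLoop_none_eq_runsR (ch : Char) (t : List Char) (i : Nat) :
    bLoop [ch] ((i : Int) + t.length) (PySem.List.enumerate t (i : Int)) none = runsR ch t i ∧
    ∀ s : Nat, bLoop [ch] ((i : Int) + t.length) (PySem.List.enumerate t (i : Int)) (some (s : Int))
      = extR ch t s i := by
  induction t generalizing i with
  | nil => simp [PySem.List.enumerate, bLoop, runsR, extR]
  | cons c t ih =>
    have hcast : ((i : Int) + 1) = ((i + 1 : Nat) : Int) := by push_cast; ring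
    have hlen : ((i : Int) + (c :: t).length) = ((i + 1 : Nat) : Int) + t.length := by
      push_cast [List.length_cons]; ring
    constructor
    · rw [PySem.List.enumerate_cons, hlen]
      by_cases hc : c = ch
      · simp only [bLoop, runsR]
        rw [if_pos (show ([c] : List Char) = [ch] by simp [hc]), if_pos hc, hcast]
        exact (ih (i + 1)).2 i
      · simp only [bLoop, runsR]
        rw [if_neg (show ¬ ([c] : List Char) = [ch] by simpa using hc), if_neg hc, hcast]
        exact (ih (i + 1)).1
    · intro s
      rw [PySem.List.enumerate_cons, hlen]
      by_cases hc : c = ch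
      · simp only [bLoop, extR]
        rw [if_pos (show ([c] : List Char) = [ch] by simp [hc]), if_pos hc, hcast]
        exact (ih (i + 1)).2 s
      · simp only [bLoop, extR]
        rw [if_neg (show ¬ ([c] : List Char) = [ch] by simpa using hc), if_neg hc, hcast]
        exact congrArg _ (ih (i + 1)).1

lemma aScan_ge (cs N : List Char) (f p : Nat) : p ≤ aScan cs N f p := by
  induction f generalizing p with
  | zero => simp [aScan]
  | succ f ih =>
    simp only [aScan]
    split_ifs with h
    · exact le_trans (by omega) (ih (p + 1))
    · exact le_refl p

lemma aScan_le (cs N : List Char) (f p : Nat) (hp : p ≤ cs.length) :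
    aScan cs N f p ≤ cs.length := by
  induction f generalizing p with
  | zero => simpa [aScan]
  | succ f ih =>
    simp only [aScan]
    split_ifs with h
    · exact ih (p + 1) (by omega)
    · exact hp

lemma extR_aScan (cs : List Char) (ch : Char) (f : Nat) :
    ∀ p s : Nat, p ≤ cs.length → cs.length - p ≤ f →
      extR ch (cs.drop p) s p =
        ((s : Int), ((aScan cs [ch] f p : Nat) : Int)) ::
          runsR ch (cs.drop (aScan cs [ch] f p)) (aScan cs [ch] f p) := by
  induction f with
  | zero =>
    intro p s hp hf
    have hpe : p = cs.length := by omega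
    subst hpe
    simp [aScan, extR, List.drop_length, runsR]
  | succ f ih =>
    intro p s hp hf
    simp only [aScan]
    split_ifs with h
    · obtain ⟨hlt, hch⟩ := h
      have hc : cs.getD p ' ' = ch := by simpa using hch
      have hget : cs[p] = ch := by rwa [List.getD_eq_getElem cs ' ' hlt] at hc
      have hdrop : cs.drop p = ch :: cs.drop (p + 1) := by
        rw [List.drop_eq_getElem_cons hlt, hget]
      rw [hdrop]
      simp only [extR, if_true]
      exact ih (p + 1) s (by omega) (by omega)
    · -- aScan stops at p
      by_cases hlt : p < cs.length
      · have hne : cs[p] ≠ ch := by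
          intro hc
          exact h ⟨hlt, by simp [List.getD_eq_getElem?_getD, List.getElem?_eq_getElem hlt, hc]⟩
        have hdrop : cs.drop p = cs[p] :: cs.drop (p + 1) := List.drop_eq_getElem_cons hlt
        rw [hdrop]
        simp [extR, runsR, hne]
      · have hpe : p = cs.length := by omega
        subst hpe
        simp [extR, List.drop_length, runsR]

lemma singleton_infix_iff (a : Char) (l : List Char) : [a] <:+: l ↔ a ∈ l := by
  constructor
  · intro h; exact h.sublist.subset (by simp)
  · intro h
    obtain ⟨s, t, rfl⟩ := List.append_of_mem h
    exact ⟨s, t, by simp⟩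

lemma aLoop_eq_runsR (cs : List Char) (ch : Char) (fuel : Nat) :
    ∀ p : Nat, p ≤ cs.length → cs.length + 1 - p ≤ fuel →
      aLoop cs [ch] fuel (PySem.Chars.findFrom cs [ch] (p : Int)) =
        runsR ch (cs.drop p) p := by
  induction fuel with
  | zero => intro p hp hf; omega
  | succ f ih =>
    intro p hp hf
    by_cases hq : PySem.Chars.findFrom cs [ch] (p : Int) = -1
    · -- no further occurrence: both sides empty
      have hni : ¬ ([ch] <:+: cs.drop p) :=
        (PySem.Chars.findFrom_natCast_eq_neg_one_iff cs [ch] p hp).mp hq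
      have hmem : ch ∉ cs.drop p := fun hm => hni ((singleton_infix_iff ch _).mpr hm)
      rw [hq, runsR_nil ch _ p hmem]
      simp [aLoop]
    · obtain ⟨hge, hpre, hmin⟩ := PySem.Chars.findFrom_natCast_spec cs [ch] p hp hq
      set q : Int := PySem.Chars.findFrom cs [ch] (p : Int) with hqdef
      have hq0 : 0 ≤ q := le_trans (by exact_mod_cast Int.natCast_nonneg p) hge
      set qn : Nat := q.toNat with hqn
      have hqq : (qn : Int) = q := Int.toNat_of_nonneg hq0
      have hpq : p ≤ qn := by omega
      -- cs[qn] = ch and qn < cs.length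
      have hqlen : qn < cs.length := by
        rcases hpre with ⟨t, ht⟩
        by_contra hcon
        rw [List.drop_eq_nil_of_le (by omega)] at ht
        exact (List.cons_ne_nil ch t) (by simpa using ht.symm)
      have hget : cs[qn] = ch := by
        rcases hpre with ⟨t, ht⟩
        have := List.drop_eq_getElem_cons hqlen
        rw [this] at ht
        exact (List.cons.injEq _ _ _ _ ▸ ht).1.symm ▸ rfl
      -- chars strictly between p and qn are not ch
      have hskip : ∀ i (_ : p ≤ i) (h2 : i < qn), cs[i]'(by omega) ≠ ch := by
        intro i hpi hiq hc
        apply hmin i hpi hiq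
        refine ⟨cs.drop (i + 1), ?_⟩
        rw [List.drop_eq_getElem_cons (by omega : i < cs.length), hc]
        rfl
      -- unfold aLoop one step
      set stop : Nat := aScan cs [ch] cs.length (qn + 1) with hstop
      have hstop_ge : qn + 1 ≤ stop := aScan_ge cs [ch] cs.length (qn + 1)
      have hstop_le : stop ≤ cs.length := aScan_le cs [ch] cs.length (qn + 1) (by omega)
      have hL : aLoop cs [ch] (f + 1) q =
          (q, (stop : Int)) :: aLoop cs [ch] f (PySem.Chars.findFrom cs [ch] (stop : Int)) := by
        simp only [aLoop, if_pos hq0]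
        rfl
      rw [hL]
      -- right side: skip to qn, open the run, close it at stop
      have hruns_skip : runsR ch (cs.drop p) p = runsR ch (cs.drop qn) qn := by
        clear hL hstop_ge hstop_le hstop
        have : ∀ k, ∀ p', p' ≤ qn → qn - p' ≤ k →
            (∀ i (_ : p' ≤ i) (h2 : i < qn), cs[i]'(by omega) ≠ ch) →
            runsR ch (cs.drop p') p' = runsR ch (cs.drop qn) qn := by
          intro k
          induction k with
          | zero => intro p' h1 h2 _; have : p' = qn := by omega
                    subst this; rfl
          | succ k ihk =>
            intro p' h1 h2 hne
            by_cases he : p' = qn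
            · subst he; rfl
            · have hlt : p' < cs.length := by omega
              rw [List.drop_eq_getElem_cons hlt]
              have hnc : cs[p'] ≠ ch := hne p' le_rfl (by omega)
              simp only [runsR, if_neg hnc]
              exact ihk (p' + 1) (by omega) (by omega) (fun i h1 h2 => hne i (by omega) h2)
        exact this qn p hpq (by omega) hskip
      rw [hruns_skip, List.drop_eq_getElem_cons hqlen, hget]
      simp only [runsR, if_true]
      rw [extR_aScan cs ch cs.length (qn + 1) qn (by omega) (by omega), ← hstop]
      rw [ih stop hstop_le (by omega), hqq]

-- main equivalence for a single-character N
lemma equal_of_single (sequence N : String) (ch : Char) (hN : N.toList = [ch]) :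
    n_intervals sequence N = n_intervals_alt sequence N := by
  unfold n_intervals n_intervals_alt
  rw [hN]
  set cs : List Char := PySem.Chars.upper sequence.toList with hcs
  have hA : aLoop cs [ch] (cs.length + 2) (PySem.Chars.find cs [ch]) = runsR ch cs 0 := by
    have := aLoop_eq_runsR cs ch (cs.length + 2) 0 (Nat.zero_le _) (by omega)
    rw [show ((0 : Nat) : Int) = (0 : Int) from rfl, PySem.Chars.findFrom_zero] at this
    simpa using this
  have hB : bLoop [ch] (cs.length : Int) (PySem.List.enumerate cs) none = runsR ch cs 0 := by
    have := (bLoop_none_eq_runsR ch cs 0).1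
    simpa [PySem.List.enumerate] using this
  rw [hA, hB]

lemma alt_eq_nil (sequence N : String) (hlen : N.toList.length ≠ 1) :
    n_intervals_alt sequence N = [] := by
  unfold n_intervals_alt
  exact bLoop_of_no_match _ _ _ (fun c h => hlen (by rw [← h]; rfl))

-- ===== VERDICT =====
theorem n_intervals_spec : Claim_unchanged_n_intervals := by
  intro sequence N _ hD
  by_cases hlen : N.toList.length = 1
  · obtain ⟨ch, hch⟩ : ∃ ch, N.toList = [ch] := by
      cases hN : N.toList with
      | nil => simp [hN] at hlen
      | cons c t => cases t with
        | nil => exact ⟨c, rfl⟩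
        | cons d u => simp [hN] at hlen
    exact equal_of_single sequence N ch hch
  · -- N not a single char and (since ¬D) nonempty and not occurring: both sides []
    unfold D_n_intervals at hD
    have hnotin : PySem.Chars.isIn N.toList (PySem.Chars.upper sequence.toList) ≠ true :=
      fun h => hD ⟨hlen, Or.inr h⟩
    have hfind : PySem.Chars.find (PySem.Chars.upper sequence.toList) N.toList = -1 := by
      rw [PySem.Chars.find_eq_neg_one_iff]
      intro hinf
      exact hnotin (by rwa [← PySem.Chars.isIn_iff_infix] at hinf)
    rw [alt_eq_nil sequence N hlen]
    show aLoop (PySem.Chars.upper sequence.toList) N.toList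
        ((PySem.Chars.upper sequence.toList).length + 2)
        (PySem.Chars.find (PySem.Chars.upper sequence.toList) N.toList) = []
    rw [hfind]
    simp [aLoop]

theorem n_intervals_changed : Claim_changed_n_intervals := by
  unfold Claim_changed_n_intervals; decide

theorem n_intervals_tight : Claim_exact_n_intervals := by
  intro sequence N _ hD
  obtain ⟨hlen, hocc⟩ := hD
  rw [alt_eq_nil sequence N hlen]
  have h0 : 0 ≤ PySem.Chars.find (PySem.Chars.upper sequence.toList) N.toList := by
    rcases hocc with h | h
    · rw [h, PySem.Chars.find_nil]
    · rw [PySem.Chars.find_nonneg_iff, ← PySem.Chars.isIn_iff_infix]; exact h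
  show aLoop (PySem.Chars.upper sequence.toList) N.toList
      ((PySem.Chars.upper sequence.toList).length + 2)
      (PySem.Chars.find (PySem.Chars.upper sequence.toList) N.toList) ≠ []
  simp only [aLoop, if_pos h0]
  exact List.cons_ne_nil _ _
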